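-- pv_equiv track=rewrite | github.com/rubentalstra/pyopenehr-am | openehr_am/aom/ids.py | _is_version_token
-- ===== SOURCE A (Python) =====
-- def _is_version_token(value: str) -> bool:
--     # Accept vN, vN.N, vN.N.N, ... (no regex).
--     if len(value) < 2:
--         return False
--     if value[0] != "v":
--         return False
--
--     digits_and_dots = value[1:]
--     if digits_and_dots[0] == "." or digits_and_dots[-1] == ".":
--         return False
--
--     saw_digit = False
--     last_was_dot = False
--
--     for ch in digits_and_dots:
--         if ch.isdigit():
--             saw_digit = True
--             last_was_dot = False
--             continue
--         if ch == ".":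
--             if last_was_dot:
--                 return False
--             last_was_dot = True
--             continue
--         return False
--
--     return saw_digit and not last_was_dot
-- ===== SOURCE B (Python) =====
-- def _is_version_token(value: str) -> bool:
--     # Split-based validation: every dot-separated part must be a nonempty digit run.
--     if len(value) < 2 or value[0] != "v":
--         return False
--     return all(p.isdigit() for p in value[1:].split("."))
-- ===== Notes on version B (the rewrite author's own statement) =====
-- stated objective: simpler
-- what changed: Replaced A's stateful character scan with saw_digit/last_was_dot flags and edge-dot guards by splitting the tail after the leading v at dots and checking that every part is a nonempty digit run via str.isdigit.
import Mathlib
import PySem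

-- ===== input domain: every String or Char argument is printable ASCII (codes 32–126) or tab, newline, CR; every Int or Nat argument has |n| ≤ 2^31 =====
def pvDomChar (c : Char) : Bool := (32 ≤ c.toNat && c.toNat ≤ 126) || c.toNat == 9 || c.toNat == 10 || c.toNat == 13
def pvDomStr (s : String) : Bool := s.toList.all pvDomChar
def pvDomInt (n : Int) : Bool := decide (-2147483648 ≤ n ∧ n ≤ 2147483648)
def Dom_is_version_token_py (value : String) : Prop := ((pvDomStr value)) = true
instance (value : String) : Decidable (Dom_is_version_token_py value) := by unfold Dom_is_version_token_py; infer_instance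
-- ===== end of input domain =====

-- B replaces A's stateful character scan (saw_digit/last_was_dot flags) by split-on-'.'
-- then "every part is a nonempty digit run"; objective: simpler.

-- ===== PORT A =====
-- the for-loop over digits_and_dots with its two flags
def avtLoop : List Char → Bool → Bool → Bool
  | [], sawDigit, lastWasDot => sawDigit && !lastWasDot
  | ch :: rest, sawDigit, lastWasDot =>
    if PySem.Chars.isdigit ch then avtLoop rest true false
    else if ch = '.' then
      if lastWasDot then false
      else avtLoop rest sawDigit true
    else false

def is_version_token_py (value : String) : Bool :=
  let vs := value.toList
  if vs.length < 2 then false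
  else if ¬ (PySem.List.pyGet? vs 0 = some 'v') then false
  else
    let dd := PySem.List.slice vs (some 1) none
    if PySem.List.pyGet? dd 0 = some '.' ∨ PySem.List.pyGet? dd (-1) = some '.' then false
    else avtLoop dd false false

-- ===== PORT B =====
def is_version_token_py_alt (value : String) : Bool :=
  let vs := value.toList
  if vs.length < 2 ∨ ¬ (PySem.List.pyGet? vs 0 = some 'v') then false
  else ((PySem.List.slice vs (some 1) none).splitOn '.').all PySem.Chars.strIsdigit

-- ===== PRECONDITION & SPEC =====
def Spec_is_version_token_py (value : String) (out : Bool) : Prop := out = is_version_token_py_alt value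
instance (value : String) (out : Bool) : Decidable (Spec_is_version_token_py value out) := by unfold Spec_is_version_token_py; infer_instance

-- ===== CLAIM (what is proved, stated in full; the proofs are below) =====
def Claim_equal_is_version_token_py : Prop := ∀ (value : String), Dom_is_version_token_py value → Spec_is_version_token_py value (is_version_token_py value)

-- ===== LEMMAS AND PROOFS =====

-- state (saw_digit := true, last_was_dot := false): the current part may continue,
-- every later part must be a nonempty digit run
def avtHeadTail (dd : List Char) : Bool :=
  match dd.splitOn '.' with
  | [] => true
  | p :: ps => p.all PySem.Chars.isdigit && ps.all PySem.Chars.strIsdigit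

theorem avt_dot_not_digit : PySem.Chars.isdigit '.' = false := by decide

theorem strIsdigit_cons (c : Char) (p : List Char) :
    PySem.Chars.strIsdigit (c :: p) = (PySem.Chars.isdigit c && p.all PySem.Chars.isdigit) := by
  simp [PySem.Chars.strIsdigit]

theorem splitOn_dot_cons (c : Char) (rest : List Char) :
    List.splitOn '.' (c :: rest) =
      if c = '.' then [] :: List.splitOn '.' rest
      else (List.splitOn '.' rest).modifyHead (List.cons c) := by
  by_cases h : c = '.' <;> simp [List.splitOn, List.splitOnP_cons, h]

theorem avtLoop_states (dd : List Char) :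
    avtLoop dd true true = (dd.splitOn '.').all PySem.Chars.strIsdigit ∧
    avtLoop dd true false = avtHeadTail dd := by
  induction dd with
  | nil => constructor <;> decide
  | cons c rest ih =>
    obtain ⟨p, ps, hsp⟩ := List.exists_cons_of_ne_nil (List.splitOnP_ne_nil (· == '.') rest)
    have hsp' : rest.splitOn '.' = p :: ps := hsp
    by_cases hdot : c = '.'
    · subst hdot
      refine ⟨?_, ?_⟩
      · simp [avtLoop, avt_dot_not_digit, splitOn_dot_cons, PySem.Chars.strIsdigit]
      · simp [avtLoop, avt_dot_not_digit, avtHeadTail, splitOn_dot_cons, ih.1]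
    · cases hd : PySem.Chars.isdigit c
      · refine ⟨?_, ?_⟩ <;>
          simp [avtLoop, hd, hdot, avtHeadTail, splitOn_dot_cons, hsp', strIsdigit_cons]
      · refine ⟨?_, ?_⟩ <;>
          simp [avtLoop, hd, hdot, avtHeadTail, splitOn_dot_cons, hsp', strIsdigit_cons, ih.2]

theorem avtLoop_trailing_dot (dd : List Char) (s l : Bool)
    (h : dd.getLast? = some '.') : avtLoop dd s l = false := by
  induction dd generalizing s l with
  | nil => simp at h
  | cons c rest ih =>
    match rest, ih with
    | [], _ =>
      simp at h
      subst h
      simp [avtLoop, avt_dot_not_digit]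
    | r :: rs, ih =>
      have h' : (r :: rs).getLast? = some '.' := by
        simpa [List.getLast?_cons_cons] using h
      have key : avtLoop (c :: r :: rs) s l =
          (if PySem.Chars.isdigit c then avtLoop (r :: rs) true false
           else if c = '.' then (if l then false else avtLoop (r :: rs) s true)
           else false) := rfl
      rw [key]
      split_ifs
      all_goals first | rfl | exact ih _ _ h'

theorem avtLoop_step (c : Char) (rest : List Char) (hne : ¬ (c = '.')) :
    avtLoop (c :: rest) false false = ((c :: rest).splitOn '.').all PySem.Chars.strIsdigit := by
  obtain ⟨p, ps, hsp⟩ := List.exists_cons_of_ne_nil (List.splitOnP_ne_nil (· == '.') rest)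
  have hsp' : rest.splitOn '.' = p :: ps := hsp
  have h2 := (avtLoop_states rest).2
  cases hd : PySem.Chars.isdigit c <;>
    simp [avtLoop, hd, hne, splitOn_dot_cons, hsp', strIsdigit_cons, h2, avtHeadTail]

-- ===== VERDICT (by name: the statement is the Claim_ definition above) =====
theorem is_version_token_py_spec : Claim_equal_is_version_token_py := by
  intro value _
  unfold Spec_is_version_token_py is_version_token_py is_version_token_py_alt
  set vs := value.toList with hvs
  by_cases hlen : vs.length < 2
  · simp [hlen]
  · by_cases hv : PySem.List.pyGet? vs 0 = some 'v'
    · simp only [hlen, hv, not_true, not_false_iff, or_false, if_neg]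
      have hdd : PySem.List.slice vs (some 1) none = vs.drop 1 := by
        simp [PySem.List.slice_from]
      rw [hdd]
      have hddne : vs.drop 1 ≠ [] := by
        intro h
        have := congrArg List.length h
        simp at this
        omega
      obtain ⟨c, rest, hcr⟩ := List.exists_cons_of_ne_nil hddne
      rw [hcr]
      have hneg : PySem.List.pyGet? (c :: rest) (-1) = (c :: rest).getLast? :=
        PySem.List.pyGet?_neg_one _
      by_cases hdot : c = '.'
      · subst hdot
        simp [splitOn_dot_cons, PySem.Chars.strIsdigit]
      · by_cases htail : (c :: rest).getLast? = some '.'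
        · have hB : ((c :: rest).splitOn '.').all PySem.Chars.strIsdigit = false := by
            rw [← avtLoop_step c rest hdot]
            exact avtLoop_trailing_dot _ _ _ htail
          rw [hB, hneg, if_pos (Or.inr htail)]
        · rw [hneg, if_neg (by simp [hdot, htail]), avtLoop_step c rest hdot]
    · simp [hlen, hv]
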